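-- pv_equiv track=rewrite | github.com/matsengrp/TemplatedMutagenesis-1 | string_compare.py | extend_one_match
-- ===== SOURCE A (Python) =====
-- def extend_one_match(reference, query, seed_start, seed_len, match_idx):
--     """Extend a match between a seed in the query and a reference
--     sequence.
--
--     Keyword arguments:
--     reference -- the reference sequence
--     query -- the query sequence
--     seed_start -- the position of the seed in the query sequence
--     seed_len -- the length of the seed in the query sequences
--     match_idx -- a position in the reference sequence where the seed matches
--
--     """
--     left = 0
--     right = 0
--     # walk left along the reference and query until the first mismatch
--     # or we reach the end
--     while True:
--         if(match_idx - left - 1 < 0):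
--             break
--         elif(seed_start - left - 1 < 0):
--             break
--         elif(reference[match_idx - left - 1] == query[seed_start - left - 1]):
--             left += 1
--         else:
--             break
--     # walk right along the reference and query until the first
--     # mismatch or we reach the end
--     while True:
--         if(match_idx + seed_len + right >= len(reference)):
--             break
--         elif(seed_start + seed_len + right >= len(query)):
--             break
--         elif(reference[match_idx + seed_len + right] == query[seed_start + seed_len + right]):
--             right += 1
--         else:
--             break
--     return (left, right)
-- ===== SOURCE B (Python) =====
-- def _common_prefix_len(s, t):
--     n = 0
--     for a, b in zip(s, t):
--         if a != b:
--             break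
--         n += 1
--     return n
--
--
-- def extend_one_match(reference, query, seed_start, seed_len, match_idx):
--     left = _common_prefix_len(reference[:max(match_idx, 0)][::-1],
--                               query[:max(seed_start, 0)][::-1])
--     right = _common_prefix_len(reference[max(match_idx + seed_len, 0):],
--                                query[max(seed_start + seed_len, 0):])
--     return (left, right)
-- ===== Notes on version B (the rewrite author's own statement) =====
-- stated objective: simpler
-- what changed: Replaced the two index-arithmetic while-loops with slicing: the left/right extensions become the common-prefix length of the reversed prefixes / the suffixes of reference and query, the slices enforcing the end-of-sequence bounds and an explicit clamp to 0 the start-of-sequence bound.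
-- outside the precondition, e.g. on extend_one_match('aa', 'aa', 0, -1, 0): A returns (0, 3), B returns (0, 2)
import Mathlib
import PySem

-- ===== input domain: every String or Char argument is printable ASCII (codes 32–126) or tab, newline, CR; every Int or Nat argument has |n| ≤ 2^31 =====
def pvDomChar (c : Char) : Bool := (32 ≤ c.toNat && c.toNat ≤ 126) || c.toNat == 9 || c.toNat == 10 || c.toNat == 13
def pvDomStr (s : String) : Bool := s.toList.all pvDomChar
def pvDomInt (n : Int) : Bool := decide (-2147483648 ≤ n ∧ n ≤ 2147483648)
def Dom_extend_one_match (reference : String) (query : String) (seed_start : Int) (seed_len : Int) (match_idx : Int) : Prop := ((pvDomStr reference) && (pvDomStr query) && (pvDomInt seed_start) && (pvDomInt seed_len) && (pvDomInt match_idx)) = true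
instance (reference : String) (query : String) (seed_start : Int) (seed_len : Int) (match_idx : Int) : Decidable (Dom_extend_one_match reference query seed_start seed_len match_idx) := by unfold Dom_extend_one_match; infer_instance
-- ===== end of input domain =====

-- B replaces A's two index-walking while-loops by slicing + a common-prefix count (objective: simpler).


-- ===== PORT A =====
-- first while-loop of A: walk left until mismatch or either index goes below 0
def pvLeftLoop (r q : List Char) (seed_start match_idx : Int) (left : Int) : Int :=
  if _h1 : match_idx - left - 1 < 0 then left
  else if seed_start - left - 1 < 0 then left
  else if PySem.List.pyGet? r (match_idx - left - 1) = PySem.List.pyGet? q (seed_start - left - 1)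
       then pvLeftLoop r q seed_start match_idx (left + 1)
       else left
termination_by (match_idx - left).toNat
decreasing_by omega

-- second while-loop of A: walk right until mismatch or either index reaches the end
def pvRightLoop (r q : List Char) (seed_start seed_len match_idx : Int) (right : Int) : Int :=
  if _h1 : match_idx + seed_len + right ≥ (r.length : Int) then right
  else if seed_start + seed_len + right ≥ (q.length : Int) then right
  else if PySem.List.pyGet? r (match_idx + seed_len + right) = PySem.List.pyGet? q (seed_start + seed_len + right)
       then pvRightLoop r q seed_start seed_len match_idx (right + 1)
       else right
termination_by ((r.length : Int) - (match_idx + seed_len + right)).toNat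
decreasing_by omega

def extend_one_match (reference : String) (query : String) (seed_start : Int) (seed_len : Int) (match_idx : Int) : Int × Int :=
  (pvLeftLoop reference.toList query.toList seed_start match_idx 0,
   pvRightLoop reference.toList query.toList seed_start seed_len match_idx 0)

-- ===== PORT B =====
-- Source B's _common_prefix_len: count leading equal pairs of zip(s, t)
def pvNcp : List Char → List Char → Int
  | a :: s, b :: t => if a = b then 1 + pvNcp s t else 0
  | _, _ => 0

-- Source B: slices ported with PySem.List.slice; [::-1] is List.reverse (exact: PySem.List.slice?_none_none_neg_one)
def extend_one_match_alt (reference : String) (query : String) (seed_start : Int) (seed_len : Int) (match_idx : Int) : Int × Int :=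
  let r := reference.toList
  let q := query.toList
  let left := pvNcp (PySem.List.slice r none (some (max match_idx 0))).reverse
                    (PySem.List.slice q none (some (max seed_start 0))).reverse
  let right := pvNcp (PySem.List.slice r (some (max (match_idx + seed_len) 0)) none)
                     (PySem.List.slice q (some (max (seed_start + seed_len) 0)) none)
  (left, right)

-- ===== PRECONDITION & SPEC =====
-- Pre_ excludes (i) the inputs on which A raises IndexError (seed/match positions past a sequence end on the left walk, or more than a sequence length below 0 on the right walk) and (ii) the inputs
-- whose right-walk start (match_idx+seed_len or seed_start+seed_len) is negative but within a
-- sequence length of 0 while both starts are left of the sequence ends: there A walks by Python's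
-- negative-index wraparound (re-reading the sequence) while B's slice reads the from-the-end suffix
-- once — both values are accidental on such nonsense seed positions (see cites).
def Pre_extend_one_match (reference : String) (query : String) (seed_start : Int) (seed_len : Int) (match_idx : Int) : Prop :=
  ¬ (1 ≤ match_idx ∧ 1 ≤ seed_start ∧
      ((reference.toList.length : Int) ≤ match_idx - 1 ∨ (query.toList.length : Int) ≤ seed_start - 1)) ∧
  ((reference.toList.length : Int) ≤ match_idx + seed_len ∨
   (query.toList.length : Int) ≤ seed_start + seed_len ∨
   (0 ≤ match_idx + seed_len ∧ 0 ≤ seed_start + seed_len))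
instance (reference : String) (query : String) (seed_start : Int) (seed_len : Int) (match_idx : Int) : Decidable (Pre_extend_one_match reference query seed_start seed_len match_idx) := by unfold Pre_extend_one_match; infer_instance

def pvWitness_extend_one_match : String × String × Int × Int × Int := ("gattaca", "ttacag", 1, 4, 2)

def Spec_extend_one_match (reference : String) (query : String) (seed_start : Int) (seed_len : Int) (match_idx : Int) (out : Int × Int) : Prop := out = extend_one_match_alt reference query seed_start seed_len match_idx
instance (reference : String) (query : String) (seed_start : Int) (seed_len : Int) (match_idx : Int) (out : Int × Int) : Decidable (Spec_extend_one_match reference query seed_start seed_len match_idx out) := by unfold Spec_extend_one_match; infer_instance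

-- ===== CLAIM (what is proved, stated in full; the proofs are below) =====
def Claim_equal_extend_one_match : Prop := ∀ (reference : String) (query : String) (seed_start : Int) (seed_len : Int) (match_idx : Int), Dom_extend_one_match reference query seed_start seed_len match_idx → Pre_extend_one_match reference query seed_start seed_len match_idx → Spec_extend_one_match reference query seed_start seed_len match_idx (extend_one_match reference query seed_start seed_len match_idx)

-- ===== LEMMAS AND PROOFS =====

theorem pvNcp_nil_left (t : List Char) : pvNcp [] t = 0 := by cases t <;> rfl
theorem pvNcp_nil_right (s : List Char) : pvNcp s [] = 0 := by cases s <;> rfl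

-- A's left loop, started at `left`, returns `left` plus the common-prefix count of what remains
-- of the reversed prefixes.
theorem pvLeftLoop_eq (r q : List Char) (ss mi l : Int)
    (hss : 0 ≤ ss) (hmi : 0 ≤ mi) (hmr : mi ≤ (r.length : Int)) (hsq : ss ≤ (q.length : Int))
    (hl : 0 ≤ l) :
    pvLeftLoop r q ss mi l
      = l + pvNcp (((r.take mi.toNat).reverse).drop l.toNat)
                  (((q.take ss.toNat).reverse).drop l.toNat) := by
  have hm : (r.take mi.toNat).reverse.length = mi.toNat := by simp; omega
  have hs : (q.take ss.toNat).reverse.length = ss.toNat := by simp; omega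
  rw [pvLeftLoop]
  split_ifs with hA hB hC
  · have h1 : ((r.take mi.toNat).reverse).drop l.toNat = [] :=
      List.drop_eq_nil_of_le (by omega)
    rw [h1, pvNcp_nil_left]; omega
  · have h1 : ((q.take ss.toNat).reverse).drop l.toNat = [] :=
      List.drop_eq_nil_of_le (by omega)
    rw [h1, pvNcp_nil_right]; omega
  · have hlm : l.toNat < ((r.take mi.toNat).reverse).length := by omega
    have hls : l.toNat < ((q.take ss.toNat).reverse).length := by omega
    have hR := List.drop_eq_getElem_cons hlm
    have hQ := List.drop_eq_getElem_cons hls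
    have hgr : PySem.List.pyGet? r (mi - l - 1)
        = some (((r.take mi.toNat).reverse)[l.toNat]'hlm) := by
      rw [PySem.List.pyGet?_eq_some_getElem _ (by omega) (by omega)]
      rw [List.getElem_reverse, List.getElem_take]
      exact congrArg _ (getElem_congr rfl (by simp; omega) _)
    have hgq : PySem.List.pyGet? q (ss - l - 1)
        = some (((q.take ss.toNat).reverse)[l.toNat]'hls) := by
      rw [PySem.List.pyGet?_eq_some_getElem _ (by omega) (by omega)]
      rw [List.getElem_reverse, List.getElem_take]
      exact congrArg _ (getElem_congr rfl (by simp; omega) _)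
    have hEq : ((r.take mi.toNat).reverse)[l.toNat]'hlm = ((q.take ss.toNat).reverse)[l.toNat]'hls := by
      rw [hgr, hgq] at hC; exact Option.some_injective _ hC
    rw [pvLeftLoop_eq r q ss mi (l + 1) hss hmi hmr hsq (by omega), hR, hQ]
    have : (l + 1).toNat = l.toNat + 1 := by omega
    rw [this]
    simp only [pvNcp, hEq, if_true]
    ring
  · have hlm : l.toNat < ((r.take mi.toNat).reverse).length := by omega
    have hls : l.toNat < ((q.take ss.toNat).reverse).length := by omega
    have hR := List.drop_eq_getElem_cons hlm
    have hQ := List.drop_eq_getElem_cons hls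
    have hgr : PySem.List.pyGet? r (mi - l - 1)
        = some (((r.take mi.toNat).reverse)[l.toNat]'hlm) := by
      rw [PySem.List.pyGet?_eq_some_getElem _ (by omega) (by omega)]
      rw [List.getElem_reverse, List.getElem_take]
      exact congrArg _ (getElem_congr rfl (by simp; omega) _)
    have hgq : PySem.List.pyGet? q (ss - l - 1)
        = some (((q.take ss.toNat).reverse)[l.toNat]'hls) := by
      rw [PySem.List.pyGet?_eq_some_getElem _ (by omega) (by omega)]
      rw [List.getElem_reverse, List.getElem_take]
      exact congrArg _ (getElem_congr rfl (by simp; omega) _)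
    have hNe : ¬ ((r.take mi.toNat).reverse)[l.toNat]'hlm = ((q.take ss.toNat).reverse)[l.toNat]'hls := by
      intro h; apply hC; rw [hgr, hgq, h]
    rw [hR, hQ]
    simp only [pvNcp, if_neg hNe]
    ring
termination_by (mi - l).toNat
decreasing_by omega

-- A's right loop, started at `right`, returns `right` plus the common-prefix count of what remains
-- of the suffixes.
theorem pvRightLoop_eq (r q : List Char) (ss sl mi rt : Int)
    (h1 : 0 ≤ mi + sl) (h2 : 0 ≤ ss + sl) (hrt : 0 ≤ rt) :
    pvRightLoop r q ss sl mi rt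
      = rt + pvNcp ((r.drop (mi + sl).toNat).drop rt.toNat)
                   ((q.drop (ss + sl).toNat).drop rt.toNat) := by
  rw [pvRightLoop]
  split_ifs with hA hB hC
  · have hd : ((r.drop (mi + sl).toNat).drop rt.toNat) = [] :=
      List.drop_eq_nil_of_le (by simp; omega)
    rw [hd, pvNcp_nil_left]; omega
  · have hd : ((q.drop (ss + sl).toNat).drop rt.toNat) = [] :=
      List.drop_eq_nil_of_le (by simp; omega)
    rw [hd, pvNcp_nil_right]; omega
  · have hlr : rt.toNat < ((r.drop (mi + sl).toNat)).length := by simp; omega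
    have hlq : rt.toNat < ((q.drop (ss + sl).toNat)).length := by simp; omega
    have hR := List.drop_eq_getElem_cons hlr
    have hQ := List.drop_eq_getElem_cons hlq
    have hgr : PySem.List.pyGet? r (mi + sl + rt)
        = some (((r.drop (mi + sl).toNat))[rt.toNat]'hlr) := by
      rw [PySem.List.pyGet?_eq_some_getElem _ (by omega) (by simp at hlr; omega)]
      rw [List.getElem_drop]
      exact congrArg _ (getElem_congr rfl (by omega) _)
    have hgq : PySem.List.pyGet? q (ss + sl + rt)
        = some (((q.drop (ss + sl).toNat))[rt.toNat]'hlq) := by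
      rw [PySem.List.pyGet?_eq_some_getElem _ (by omega) (by simp at hlq; omega)]
      rw [List.getElem_drop]
      exact congrArg _ (getElem_congr rfl (by omega) _)
    have hEq : ((r.drop (mi + sl).toNat))[rt.toNat]'hlr = ((q.drop (ss + sl).toNat))[rt.toNat]'hlq := by
      rw [hgr, hgq] at hC; exact Option.some_injective _ hC
    rw [pvRightLoop_eq r q ss sl mi (rt + 1) h1 h2 (by omega), hR, hQ]
    have : (rt + 1).toNat = rt.toNat + 1 := by omega
    rw [this]
    simp only [pvNcp, hEq, if_true]
    ring
  · have hlr : rt.toNat < ((r.drop (mi + sl).toNat)).length := by simp; omega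
    have hlq : rt.toNat < ((q.drop (ss + sl).toNat)).length := by simp; omega
    have hR := List.drop_eq_getElem_cons hlr
    have hQ := List.drop_eq_getElem_cons hlq
    have hgr : PySem.List.pyGet? r (mi + sl + rt)
        = some (((r.drop (mi + sl).toNat))[rt.toNat]'hlr) := by
      rw [PySem.List.pyGet?_eq_some_getElem _ (by omega) (by simp at hlr; omega)]
      rw [List.getElem_drop]
      exact congrArg _ (getElem_congr rfl (by omega) _)
    have hgq : PySem.List.pyGet? q (ss + sl + rt)
        = some (((q.drop (ss + sl).toNat))[rt.toNat]'hlq) := by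
      rw [PySem.List.pyGet?_eq_some_getElem _ (by omega) (by simp at hlq; omega)]
      rw [List.getElem_drop]
      exact congrArg _ (getElem_congr rfl (by omega) _)
    have hNe : ¬ ((r.drop (mi + sl).toNat))[rt.toNat]'hlr = ((q.drop (ss + sl).toNat))[rt.toNat]'hlq := by
      intro h; apply hC; rw [hgr, hgq, h]
    rw [hR, hQ]
    simp only [pvNcp, if_neg hNe]
    ring
termination_by ((r.length : Int) - (mi + sl + rt)).toNat
decreasing_by omega

-- ===== VERDICT (by name: the statement is the Claim_ definition above) =====
theorem extend_one_match_spec : Claim_equal_extend_one_match := by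
  intro reference query ss sl mi _hdom hpre
  obtain ⟨hnlr, hright⟩ := hpre
  unfold Spec_extend_one_match extend_one_match extend_one_match_alt
  dsimp only
  rw [PySem.List.slice_to _ (le_max_right _ _),
      PySem.List.slice_to _ (le_max_right _ _),
      PySem.List.slice_from _ (le_max_right _ _),
      PySem.List.slice_from _ (le_max_right _ _)]
  push Not at hnlr
  refine Prod.ext ?_ ?_
  · -- left extension
    by_cases h1 : mi ≤ 0
    · rw [pvLeftLoop, dif_pos (by omega)]
      rw [show (max mi 0).toNat = 0 by omega]
      simp [pvNcp_nil_left]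
    · by_cases h2 : ss ≤ 0
      · rw [pvLeftLoop, dif_neg (by omega), if_pos (by omega)]
        rw [show (max ss 0).toNat = 0 by omega]
        simp [pvNcp_nil_right]
      · have hbounds : mi ≤ (reference.toList.length : Int) ∧ ss ≤ (query.toList.length : Int) := by
          rcases hnlr (by omega) (by omega) with ⟨ha, hb⟩; omega
        rw [pvLeftLoop_eq reference.toList query.toList ss mi 0 (by omega) (by omega)
              hbounds.1 hbounds.2 le_rfl,
            show max mi 0 = mi by omega, show max ss 0 = ss by omega]
        simp
  · -- right extension
    by_cases ha : (reference.toList.length : Int) ≤ mi + sl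
    · rw [pvRightLoop, dif_pos (by omega)]
      have hd : reference.toList.drop (max (mi + sl) 0).toNat = [] :=
        List.drop_eq_nil_of_le (by omega)
      rw [hd, pvNcp_nil_left]
    · by_cases hb : (query.toList.length : Int) ≤ ss + sl
      · rw [pvRightLoop, dif_neg (by omega), if_pos (by omega)]
        have hd : query.toList.drop (max (ss + sl) 0).toNat = [] :=
          List.drop_eq_nil_of_le (by omega)
        rw [hd, pvNcp_nil_right]
      · have hab : 0 ≤ mi + sl ∧ 0 ≤ ss + sl := by
          rcases hright with h | h | h <;> omega
        rw [pvRightLoop_eq reference.toList query.toList ss sl mi 0 hab.1 hab.2 le_rfl,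
            show max (mi + sl) 0 = mi + sl by omega, show max (ss + sl) 0 = ss + sl by omega]
        simp
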